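-- pv_equiv track=rewrite | github.com/vasyl-vaskovskyi/cryptolake | src/cli/gaps.py | _format_hours_line
-- ===== SOURCE A (Python) =====
-- def _format_hours_line(hours: dict[int, str], expect_from: int = 0, expect_to: int = 23) -> str:
--     """Produce a compact single-line representation of hour coverage.
--
--     Only shows hours within the expected recording window [expect_from, expect_to].
--     Example: "15-23 OK" or "0-15 OK  16 MISSING  17 MISSING  18-23 OK"
--     """
--     STATUS_LABEL = {
--         "present": "OK",
--         "backfilled": "RECOVERED",
--         "late": "OK",
--         "missing": "MISSING",
--     }
--
--     hour_range = range(expect_from, expect_to + 1)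
--     if not hour_range:
--         return "no hours expected"
--
--     all_hours = [(h, hours.get(h, "missing")) for h in hour_range]
--
--     segments: list[tuple[int, int, str]] = []
--     run_start = all_hours[0][0]
--     run_status = all_hours[0][1]
--     for h, status in all_hours[1:]:
--         if status != run_status:
--             segments.append((run_start, h - 1, run_status))
--             run_start = h
--             run_status = status
--     segments.append((run_start, expect_to, run_status))
--
--     parts: list[str] = []
--     for start, end, status in segments:
--         label = STATUS_LABEL.get(status, status.upper())
--         if start == end:
--             parts.append(f"{start} {label}")
--         else:
--             parts.append(f"{start}-{end} {label}")
--     return "  ".join(parts)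
-- ===== SOURCE B (Python) =====
-- def _format_hours_line(hours: dict[int, str], expect_from: int = 0, expect_to: int = 23) -> str:
--     """Two-pointer run scan: walk the window once, extending each run in place
--     and formatting it immediately -- no all_hours list, no segments list."""
--     STATUS_LABEL = {
--         "present": "OK",
--         "backfilled": "RECOVERED",
--         "late": "OK",
--         "missing": "MISSING",
--     }
--
--     if expect_from > expect_to:
--         return "no hours expected"
--
--     parts = []
--     h = expect_from
--     while h <= expect_to:
--         status = hours.get(h, "missing")
--         end = h
--         while end < expect_to and hours.get(end + 1, "missing") == status:
--             end += 1
--         label = STATUS_LABEL.get(status, status.upper())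
--         parts.append(f"{h} {label}" if h == end else f"{h}-{end} {label}")
--         h = end + 1
--     return "  ".join(parts)
-- ===== Notes on version B (the rewrite author's own statement) =====
-- stated objective: simpler
-- what changed: Replaced A's three-phase pipeline (materialize all_hours, run a run_start/run_status state machine into a segments list, then a formatting loop) with a single two-pointer scan that extends each run in place and formats it immediately, with no intermediate lists.
import Mathlib
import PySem

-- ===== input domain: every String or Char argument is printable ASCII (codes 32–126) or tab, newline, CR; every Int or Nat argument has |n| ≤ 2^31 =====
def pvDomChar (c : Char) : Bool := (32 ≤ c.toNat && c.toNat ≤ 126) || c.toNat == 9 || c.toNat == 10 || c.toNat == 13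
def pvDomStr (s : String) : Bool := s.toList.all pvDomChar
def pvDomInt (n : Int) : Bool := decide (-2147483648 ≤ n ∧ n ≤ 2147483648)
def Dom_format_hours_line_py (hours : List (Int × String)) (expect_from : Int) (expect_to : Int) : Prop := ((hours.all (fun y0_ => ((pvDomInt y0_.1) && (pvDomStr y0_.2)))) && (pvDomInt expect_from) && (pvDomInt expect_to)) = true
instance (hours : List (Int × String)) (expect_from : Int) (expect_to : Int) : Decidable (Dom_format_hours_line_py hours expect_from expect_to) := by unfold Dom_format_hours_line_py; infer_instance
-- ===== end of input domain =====

-- B replaces A's three-phase pipeline (all_hours list, run state machine into segments, formatting pass)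
-- by a single two-pointer scan formatting each run as it is found: simpler, same O(n) cost.

-- shared small helpers (both Pythons do these exact lookups/formatting)
def pvStatus (hours : List (Int × String)) (h : Int) : String :=
  (PySem.Dict.mk hours).getD h "missing"

def pvLabel (st : String) : String :=
  (PySem.Dict.mk [("present","OK"),("backfilled","RECOVERED"),("late","OK"),("missing","MISSING")]).getD st (PySem.Str.upper st)

def pvFmt (s e : Int) (st : String) : String :=
  if s = e then PySem.Int.toStr s ++ " " ++ pvLabel st
  else PySem.Int.toStr s ++ "-" ++ PySem.Int.toStr e ++ " " ++ pvLabel st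

-- ===== PORT A =====
-- A's fold step over all_hours[1:]: state = (segments, run_start, run_status)
def pvStepA (s : List (Int × Int × String) × Int × String) (p : Int × String) :
    List (Int × Int × String) × Int × String :=
  if p.2 ≠ s.2.2 then (s.1 ++ [(s.2.1, p.1 - 1, s.2.2)], p.1, p.2) else s

def format_hours_line_py (hours : List (Int × String)) (expect_from : Int) (expect_to : Int) : String :=
  let hour_range := PySem.List.pyRange expect_from (expect_to + 1) 1
  if hour_range = [] then "no hours expected"
  else
    let all_hours := hour_range.map (fun h => (h, pvStatus hours h))
    let first := all_hours.headD (0, "")   -- all_hours[0]; list is nonempty under the guard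
    let fin := all_hours.tail.foldl pvStepA ([], first.1, first.2)
    let segments := fin.1 ++ [(fin.2.1, expect_to, fin.2.2)]
    let parts := segments.map (fun seg => pvFmt seg.1 seg.2.1 seg.2.2)
    PySem.Str.join "  " parts

-- ===== PORT B =====
-- inner while: extend the run while the next hour has the same status
def pvRunEnd (hours : List (Int × String)) (t : Int) (st : String) (e : Int) : Int :=
  if h : e < t ∧ pvStatus hours (e + 1) = st then pvRunEnd hours t st (e + 1) else e
termination_by (t - e).toNat
decreasing_by omega

theorem pvRunEnd_ge (hours : List (Int × String)) (t : Int) (st : String) (e : Int) :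
    e ≤ pvRunEnd hours t st e := by
  fun_induction pvRunEnd <;> omega

-- outer while over h, emitting one formatted part per run
def pvBLoop (hours : List (Int × String)) (t : Int) (h : Int) : List String :=
  if hle : h ≤ t then
    let st := pvStatus hours h
    let e := pvRunEnd hours t st h
    pvFmt h e st :: pvBLoop hours t (e + 1)
  else []
termination_by (t + 1 - h).toNat
decreasing_by
  have := pvRunEnd_ge hours t (pvStatus hours h) h
  omega

def format_hours_line_py_alt (hours : List (Int × String)) (expect_from : Int) (expect_to : Int) : String :=
  if expect_to < expect_from then "no hours expected"
  else PySem.Str.join "  " (pvBLoop hours expect_to expect_from)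

-- ===== PRECONDITION & SPEC =====
def Spec_format_hours_line_py (hours : List (Int × String)) (expect_from : Int) (expect_to : Int) (out : String) : Prop := out = format_hours_line_py_alt hours expect_from expect_to
instance (hours : List (Int × String)) (expect_from : Int) (expect_to : Int) (out : String) : Decidable (Spec_format_hours_line_py hours expect_from expect_to out) := by unfold Spec_format_hours_line_py; infer_instance

-- ===== CLAIM (what is proved, stated in full; the proofs are below) =====
def Claim_equal_format_hours_line_py : Prop := ∀ (hours : List (Int × String)) (expect_from : Int) (expect_to : Int), Dom_format_hours_line_py hours expect_from expect_to → Spec_format_hours_line_py hours expect_from expect_to (format_hours_line_py hours expect_from expect_to)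

-- ===== LEMMAS AND PROOFS =====

theorem pvRunEnd_le (hours : List (Int × String)) (t : Int) (st : String) (e : Int)
    (h : e ≤ t) : pvRunEnd hours t st e ≤ t := by
  fun_induction pvRunEnd <;> omega

theorem pvRunEnd_const (hours : List (Int × String)) (t : Int) (st : String) (e : Int) :
    ∀ x, e < x → x ≤ pvRunEnd hours t st e → pvStatus hours x = st := by
  fun_induction pvRunEnd with
  | case1 e h ih =>
    intro x hx1 hx2
    rcases lt_or_ge (e + 1) x with h' | h'
    · exact ih x h' hx2
    · have hxe : x = e + 1 := by omega
      rw [hxe]; exact h.2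
  | case2 e h =>
    intro x hx1 hx2; omega

theorem pvRunEnd_stop (hours : List (Int × String)) (t : Int) (st : String) (e : Int)
    (h : pvRunEnd hours t st e < t) : pvStatus hours (pvRunEnd hours t st e + 1) ≠ st := by
  fun_induction pvRunEnd with
  | case1 e h' ih => exact ih h
  | case2 e h' => intro hc; exact h' ⟨h, hc⟩

-- A's segment machine, recast structurally (segments produced from state (rs, rst) over remaining pairs)
def segsA (t : Int) (rs : Int) (rst : String) (l : List (Int × String)) : List (Int × Int × String) :=
  match l with
  | [] => [(rs, t, rst)]
  | p :: rest => if p.2 ≠ rst then (rs, p.1 - 1, rst) :: segsA t p.1 p.2 rest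
                 else segsA t rs rst rest

theorem segsA_nil (t rs : Int) (rst : String) : segsA t rs rst [] = [(rs, t, rst)] := rfl

theorem segsA_cons_ne (t rs : Int) (rst : String) (x : Int) (s : String)
    (l : List (Int × String)) (h : s ≠ rst) :
    segsA t rs rst ((x, s) :: l) = (rs, x - 1, rst) :: segsA t x s l := by
  simp [segsA, h]

theorem segsA_cons_eq (t rs : Int) (rst : String) (x : Int) (s : String)
    (l : List (Int × String)) (h : s = rst) :
    segsA t rs rst ((x, s) :: l) = segsA t rs rst l := by
  simp [segsA, h]

theorem fold_segsA (t : Int) (l : List (Int × String)) :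
    ∀ (segs : List (Int × Int × String)) (rs : Int) (rst : String),
    (l.foldl pvStepA (segs, rs, rst)).1 ++
      [((l.foldl pvStepA (segs, rs, rst)).2.1, t, (l.foldl pvStepA (segs, rs, rst)).2.2)]
    = segs ++ segsA t rs rst l := by
  induction l with
  | nil => intro segs rs rst; simp [segsA]
  | cons p rest ih =>
    obtain ⟨x, s⟩ := p
    intro segs rs rst
    by_cases hne : s ≠ rst
    · rw [List.foldl_cons, show pvStepA (segs, rs, rst) (x, s)
          = (segs ++ [(rs, x - 1, rst)], x, s) by simp [pvStepA, hne],
        ih, segsA_cons_ne t rs rst x s rest hne, List.append_assoc, List.singleton_append]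
    · push Not at hne
      rw [List.foldl_cons, show pvStepA (segs, rs, rst) (x, s) = (segs, rs, rst) by
            simp [pvStepA, hne],
        ih, segsA_cons_eq t rs rst x s rest hne]

theorem segsA_skip (t : Int) (rs : Int) (rst : String) (l1 l2 : List (Int × String))
    (h : ∀ p ∈ l1, p.2 = rst) : segsA t rs rst (l1 ++ l2) = segsA t rs rst l2 := by
  induction l1 with
  | nil => simp
  | cons p rest ih =>
    obtain ⟨x, s⟩ := p
    have hp : s = rst := h (x, s) (by simp)
    rw [List.cons_append, segsA_cons_eq t rs rst x s _ hp]
    exact ih (fun q hq => h q (List.mem_cons_of_mem _ hq))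

theorem segsA_eq_bloop (hours : List (Int × String)) (t : Int) :
    ∀ (n : Nat) (h : Int), (t + 1 - h).toNat = n → h ≤ t →
    (segsA t h (pvStatus hours h)
      ((PySem.List.pyRange (h + 1) (t + 1) 1).map (fun x => (x, pvStatus hours x)))).map
      (fun seg => pvFmt seg.1 seg.2.1 seg.2.2)
    = pvBLoop hours t h := by
  intro n
  induction n using Nat.strong_induction_on with
  | _ n ih =>
    intro h hn hle
    set st := pvStatus hours h with hst
    set e := pvRunEnd hours t st h with he
    have hge : h ≤ e := pvRunEnd_ge hours t st h
    have hlet : e ≤ t := pvRunEnd_le hours t st h hle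
    have hskip : segsA t h st
        ((PySem.List.pyRange (h + 1) (t + 1) 1).map (fun x => (x, pvStatus hours x)))
        = segsA t h st ((PySem.List.pyRange (e + 1) (t + 1) 1).map (fun x => (x, pvStatus hours x))) := by
      rw [PySem.List.pyRange_one_append (h + 1) (e + 1) (t + 1) (by omega) (by omega),
        List.map_append]
      apply segsA_skip
      intro p hp
      simp only [List.mem_map] at hp
      obtain ⟨x, hx, rfl⟩ := hp
      rw [PySem.List.mem_pyRange_one] at hx
      exact pvRunEnd_const hours t st h x (by omega) (by omega)
    rw [hskip, pvBLoop, dif_pos hle, ← hst]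
    show _ = pvFmt h (pvRunEnd hours t st h) st :: pvBLoop hours t (pvRunEnd hours t st h + 1)
    rw [← he]
    rcases eq_or_lt_of_le hlet with heq | hlt
    · -- e = t : the run reaches the end of the window
      rw [heq, PySem.List.pyRange_one_eq_nil (le_refl (t + 1)), List.map_nil, segsA_nil,
        List.map_cons, List.map_nil, pvBLoop, dif_neg (by omega : ¬ t + 1 ≤ t)]
    · -- e < t : status changes at e + 1; recurse on the rest of the window
      have hne : pvStatus hours (e + 1) ≠ st := pvRunEnd_stop hours t st h hlt
      rw [PySem.List.pyRange_one_cons (by omega : e + 1 < t + 1), List.map_cons,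
        segsA_cons_ne t h st (e + 1) (pvStatus hours (e + 1)) _ hne, List.map_cons,
        show e + 1 - 1 = e by ring]
      congr 1
      exact ih ((t + 1 - (e + 1)).toNat) (by omega) (e + 1) rfl (by omega)

-- ===== VERDICT (by name: the statement is the Claim_ definition above) =====
theorem format_hours_line_py_spec : Claim_equal_format_hours_line_py := by
  intro hours ef et _dom
  unfold Spec_format_hours_line_py format_hours_line_py format_hours_line_py_alt
  rcases lt_or_ge et ef with hlt | hle
  · rw [PySem.List.pyRange_one_eq_nil (by omega)]
    simp [hlt]
  · rw [if_neg (by omega : ¬ et < ef), PySem.List.pyRange_one_cons (by omega : ef < et + 1),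
      if_neg (by simp : ¬ (ef :: PySem.List.pyRange (ef + 1) (et + 1) 1 = []))]
    simp only [List.map_cons, List.headD_cons, List.tail_cons]
    rw [← segsA_eq_bloop hours et ((et + 1 - ef).toNat) ef rfl hle]
    congr 1
    congr 1
    exact (fold_segsA et _ [] ef (pvStatus hours ef)).trans (by simp)
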